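-- pv_equiv track=rewrite | github.com/Mateo334/Chess_bot | Later_use/pyview.py | ascii_to_fen
-- ===== SOURCE A (Python) =====
-- def ascii_to_fen(ascii_board):
--     fen_rows = []
--     for row in ascii_board.strip().split('\n'):
--         fen_row = ''
--         empty_count = 0
--         for char in row.split():
--             if char in '.-':
--                 empty_count += 1
--             else:
--                 if empty_count > 0:
--                     fen_row += str(empty_count)
--                     empty_count = 0
--                 fen_row += char
--         if empty_count > 0:
--             fen_row += str(empty_count)
--         fen_rows.append(fen_row)
--     return '/'.join(fen_rows) + ' w KQkq - 0 1'
-- ===== SOURCE B (Python) =====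
-- def ascii_to_fen(ascii_board):
--     def row_fen(tokens):
--         if not tokens:
--             return ''
--         if tokens[0] in '.-':
--             run = 1
--             while run < len(tokens) and tokens[run] in '.-':
--                 run += 1
--             return str(run) + row_fen(tokens[run:])
--         return tokens[0] + row_fen(tokens[1:])
--     rows = [row_fen(line.split()) for line in ascii_board.strip().split('\n')]
--     return '/'.join(rows) + ' w KQkq - 0 1'
-- ===== Notes on version B (the rewrite author's own statement) =====
-- stated objective: alternative
-- what changed: Replaces A's empty_count accumulator with flush-before-token and flush-at-end by a recursive run scanner that consumes each maximal run of empty tokens at once and emits its length directly, with rows built by a comprehension.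
import Mathlib
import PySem

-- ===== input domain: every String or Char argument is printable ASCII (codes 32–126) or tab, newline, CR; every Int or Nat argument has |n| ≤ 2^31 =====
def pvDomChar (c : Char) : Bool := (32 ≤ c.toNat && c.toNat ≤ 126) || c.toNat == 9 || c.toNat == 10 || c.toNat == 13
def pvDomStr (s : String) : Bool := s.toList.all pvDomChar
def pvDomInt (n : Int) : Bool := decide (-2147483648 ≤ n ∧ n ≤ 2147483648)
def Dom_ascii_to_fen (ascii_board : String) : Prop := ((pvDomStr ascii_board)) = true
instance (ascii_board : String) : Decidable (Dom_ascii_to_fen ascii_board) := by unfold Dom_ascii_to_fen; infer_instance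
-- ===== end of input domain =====

-- B replaces A's empty_count accumulator/flush loop by a recursive run scanner (objective: alternative decomposition).

-- ===== PORT A =====
-- inner loop body: state (fen_row, empty_count)
def pvAStep (st : String × Nat) (ch : String) : String × Nat :=
  if PySem.Str.isIn ch ".-" then (st.1, st.2 + 1)
  else ((if st.2 > 0 then st.1 ++ PySem.Int.toStr (st.2 : Int) else st.1) ++ ch, 0)

-- one row: fold the tokens, then the final flush of empty_count
def pvARow (tokens : List String) : String :=
  let st := tokens.foldl pvAStep ("", 0)
  if st.2 > 0 then st.1 ++ PySem.Int.toStr (st.2 : Int) else st.1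

def ascii_to_fen (ascii_board : String) : String :=
  let fen_rows := ((PySem.Str.split? (PySem.Str.strip ascii_board) "\n").getD []).foldl
    (fun acc row => acc ++ [pvARow (PySem.Str.split₀ row)]) []
  PySem.Str.join "/" fen_rows ++ " w KQkq - 0 1"

-- ===== PORT B =====
-- row_fen: the leading run of empty tokens (the while loop) becomes 1 + takeWhile-length
def pvBRow : List String → String
  | [] => ""
  | t :: rest =>
    if PySem.Str.isIn t ".-" then
      let run := 1 + (rest.takeWhile (fun s => PySem.Str.isIn s ".-")).length
      PySem.Int.toStr (run : Int) ++ pvBRow (rest.drop (run - 1))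
    else
      t ++ pvBRow rest
termination_by l => l.length
decreasing_by
  · simp only [List.length_cons, List.length_drop]; omega
  · simp

def ascii_to_fen_alt (ascii_board : String) : String :=
  let rows := ((PySem.Str.split? (PySem.Str.strip ascii_board) "\n").getD []).map
    (fun line => pvBRow (PySem.Str.split₀ line))
  PySem.Str.join "/" rows ++ " w KQkq - 0 1"

-- ===== PRECONDITION & SPEC =====
def Spec_ascii_to_fen (ascii_board : String) (out : String) : Prop := out = ascii_to_fen_alt ascii_board
instance (ascii_board : String) (out : String) : Decidable (Spec_ascii_to_fen ascii_board out) := by unfold Spec_ascii_to_fen; infer_instance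

-- ===== CLAIM (what is proved, stated in full; the proofs are below) =====
def Claim_equal_ascii_to_fen : Prop := ∀ (ascii_board : String), Dom_ascii_to_fen ascii_board → Spec_ascii_to_fen ascii_board (ascii_to_fen ascii_board)

-- ===== LEMMAS AND PROOFS =====

-- proof-only intermediary: A's pending empty_count c followed by the remaining tokens
def pvEmit : Nat → List String → String
  | c, [] => if c > 0 then PySem.Int.toStr (c : Int) else ""
  | c, t :: rest =>
    if PySem.Str.isIn t ".-" then pvEmit (c + 1) rest
    else (if c > 0 then PySem.Int.toStr (c : Int) else "") ++ (t ++ pvEmit 0 rest)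

theorem pvFold_emit (tokens : List String) (acc : String) (c : Nat) :
    (let st := tokens.foldl pvAStep (acc, c)
     if st.2 > 0 then st.1 ++ PySem.Int.toStr (st.2 : Int) else st.1) = acc ++ pvEmit c tokens := by
  induction tokens generalizing acc c with
  | nil =>
      simp only [List.foldl_nil, pvEmit]
      split <;> simp
  | cons t rest ih =>
      simp only [List.foldl_cons, pvAStep, pvEmit]
      by_cases h : PySem.Str.isIn t ".-" <;> simp only [h, if_true, Bool.false_eq_true, if_false]
      · exact ih acc (c + 1)
      · rw [ih]
        split <;> simp [String.append_assoc]

theorem pvEmit_pos (tokens : List String) (c : Nat) (hc : 0 < c) :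
    pvEmit c tokens =
      PySem.Int.toStr ((c + (tokens.takeWhile (fun s => PySem.Str.isIn s ".-")).length : Nat) : Int)
        ++ pvEmit 0 (tokens.drop (tokens.takeWhile (fun s => PySem.Str.isIn s ".-")).length) := by
  induction tokens generalizing c with
  | nil => simp [pvEmit, hc]
  | cons t rest ih =>
      by_cases h : PySem.Str.isIn t ".-"
      · simp only [pvEmit, h, if_true, List.takeWhile_cons, List.length_cons, List.drop_succ_cons]
        rw [ih (c + 1) (by omega)]
        congr 2
        omega
      · have h' : ¬ PySem.Chars.isIn t.toList ['.', '-'] = true := by simpa using h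
        simp [pvEmit, h', hc]

theorem pvEmit_eq_pvBRow (tokens : List String) : pvEmit 0 tokens = pvBRow tokens := by
  induction tokens using pvBRow.induct with
  | case1 => simp [pvEmit, pvBRow]
  | case2 t rest h run ih =>
      simp only [pvEmit, h, if_true, pvBRow]
      rw [pvEmit_pos rest 1 (by omega)]
      rw [show 1 + (rest.takeWhile (fun s => PySem.Str.isIn s ".-")).length - 1
            = (rest.takeWhile (fun s => PySem.Str.isIn s ".-")).length from by omega]
      rw [show 1 + (rest.takeWhile (fun s => PySem.Str.isIn s ".-")).length - 1
            = (rest.takeWhile (fun s => PySem.Str.isIn s ".-")).length from by omega] at ih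
      rw [ih]
  | case3 t rest h ih =>
      simp only [pvEmit, h, Bool.false_eq_true, if_false, pvBRow]
      rw [ih]
      simp

theorem pvARow_eq_pvBRow (tokens : List String) : pvARow tokens = pvBRow tokens := by
  rw [pvARow, pvFold_emit tokens "" 0, pvEmit_eq_pvBRow]
  simp

theorem pvFoldl_append (l : List String) (f : String → String) (acc : List String) :
    l.foldl (fun a r => a ++ [f r]) acc = acc ++ l.map f := by
  induction l generalizing acc with
  | nil => simp
  | cons x xs ih => simp [ih]

-- ===== VERDICT (by name: the statement is the Claim_ definition above) =====
theorem ascii_to_fen_spec : Claim_equal_ascii_to_fen := by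
  intro s _
  show ascii_to_fen s = ascii_to_fen_alt s
  unfold ascii_to_fen ascii_to_fen_alt
  rw [pvFoldl_append]
  simp [pvARow_eq_pvBRow]
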